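-- pv_equiv track=rewrite | github.com/AwesomeOwls/Gifted | owls/gifted/utils.py | is_spammer
-- ===== SOURCE A (Python) =====
-- SPAM_TIME_TH = 5000
--
-- SPAM_GIFT_TH = 5
--
-- def is_spammer(liked_gifts_ids):
--     first_dislike_found = False
--     first_dislike_ts = 0
--     last_dislike_ts = 0
--     dislike_counter = 0
--     for liked_obj in reversed(liked_gifts_ids):
--         if not first_dislike_found and liked_obj['is_like'] == 0:
--             first_dislike_ts = liked_obj['timestamp']
--             first_dislike_found = True
--             dislike_counter += 1
--         elif liked_obj['is_like'] == 0:
--             dislike_counter += 1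
--             last_dislike_ts = liked_obj['timestamp']
--
--         if dislike_counter == SPAM_GIFT_TH and first_dislike_ts - last_dislike_ts <= SPAM_TIME_TH:
--             return True
--     return False
-- ===== SOURCE B (Python) =====
-- SPAM_TIME_TH = 5000
--
-- SPAM_GIFT_TH = 5
--
-- def is_spammer(liked_gifts_ids):
--     # forward chronological scan with a bounded sliding window of the
--     # SPAM_GIFT_TH most recent dislike timestamps
--     window = []
--     for o in liked_gifts_ids:
--         if o['is_like'] == 0:
--             window.append(o['timestamp'])
--             if len(window) > SPAM_GIFT_TH:
--                 window.pop(0)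
--     return len(window) == SPAM_GIFT_TH and window[-1] - window[0] <= SPAM_TIME_TH
-- ===== Notes on version B (the rewrite author's own statement) =====
-- stated objective: alternative
-- what changed: Replaces A's backwards scan with first/last-timestamp variables, a found flag, a counter and a mid-loop early return by a forward chronological pass maintaining a bounded sliding window of the 5 most recent dislike timestamps, followed by one final span test on the window.
import Mathlib
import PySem

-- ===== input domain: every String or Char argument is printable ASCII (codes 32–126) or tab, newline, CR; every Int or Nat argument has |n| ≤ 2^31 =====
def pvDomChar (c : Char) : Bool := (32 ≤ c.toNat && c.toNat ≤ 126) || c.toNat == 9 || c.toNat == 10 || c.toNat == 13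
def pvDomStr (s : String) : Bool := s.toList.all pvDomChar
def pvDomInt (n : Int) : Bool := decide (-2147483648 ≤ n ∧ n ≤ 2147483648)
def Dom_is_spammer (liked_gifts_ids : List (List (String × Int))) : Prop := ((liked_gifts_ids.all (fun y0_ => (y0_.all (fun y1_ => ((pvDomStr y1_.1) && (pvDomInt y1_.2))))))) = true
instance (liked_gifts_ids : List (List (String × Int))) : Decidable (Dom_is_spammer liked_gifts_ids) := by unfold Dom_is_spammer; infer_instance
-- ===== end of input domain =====

-- B replaces A's backwards scan (flags, first/last timestamps, counter, early return) by a forward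
-- chronological pass keeping a bounded sliding window of the 5 newest dislike timestamps and one
-- final span test (objective: alternative decomposition, same O(n) cost).

-- ===== PORT A =====
-- the loop of A over reversed(liked_gifts_ids); state = (found, first_ts, last_ts, counter).
-- dict lookups use List.lookup (first match); .getD 0 is only reached outside Pre_ (Python raises KeyError there).
def spamLoopA : List (List (String × Int)) → Bool → Int → Int → Int → Bool
  | [], _, _, _, _ => false
  | o :: rest, found, fts, lts, cnt =>
    if !found && ((o.lookup "is_like").getD 0 == 0) then
      let fts' := (o.lookup "timestamp").getD 0
      let cnt' := cnt + 1
      if cnt' == 5 && decide (fts' - lts ≤ 5000) then true else spamLoopA rest true fts' lts cnt'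
    else if (o.lookup "is_like").getD 0 == 0 then
      let lts' := (o.lookup "timestamp").getD 0
      let cnt' := cnt + 1
      if cnt' == 5 && decide (fts - lts' ≤ 5000) then true else spamLoopA rest found fts lts' cnt'
    else
      if cnt == 5 && decide (fts - lts ≤ 5000) then true else spamLoopA rest found fts lts cnt

def is_spammer (liked_gifts_ids : List (List (String × Int))) : Bool :=
  spamLoopA liked_gifts_ids.reverse false 0 0 0

-- ===== PORT B =====
-- B's forward loop; 'window.pop(0)' on the (nonempty) window is '.tail'.
def spamLoopB : List (List (String × Int)) → List Int → List Int
  | [], w => w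
  | o :: rest, w =>
    if (o.lookup "is_like").getD 0 == 0 then
      let w' := w ++ [(o.lookup "timestamp").getD 0]
      spamLoopB rest (if 5 < w'.length then w'.tail else w')
    else spamLoopB rest w

def is_spammer_alt (liked_gifts_ids : List (List (String × Int))) : Bool :=
  let w := spamLoopB liked_gifts_ids []
  (w.length == 5) && decide (w.getLast?.getD 0 - w.headD 0 ≤ 5000)

-- ===== PRECONDITION & SPEC =====
-- Pre_ excludes inputs on which a dict lacks the 'is_like' key, or a dislike dict lacks the
-- 'timestamp' key: Python A raises KeyError on such an element (or, if A returns True before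
-- reaching it, B raises KeyError there), so no agreed value exists on those inputs.
def Pre_is_spammer (liked_gifts_ids : List (List (String × Int))) : Prop :=
  ∀ o ∈ liked_gifts_ids,
    (o.lookup "is_like").isSome = true ∧
    (o.lookup "is_like" = some 0 → (o.lookup "timestamp").isSome = true)
instance (liked_gifts_ids : List (List (String × Int))) : Decidable (Pre_is_spammer liked_gifts_ids) := by
  unfold Pre_is_spammer; infer_instance

def pvWitness_is_spammer : (List (List (String × Int))) :=
  [[("is_like", 0), ("timestamp", 10)], [("is_like", 1), ("timestamp", 20)]]

def Spec_is_spammer (liked_gifts_ids : List (List (String × Int))) (out : Bool) : Prop := out = is_spammer_alt liked_gifts_ids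
instance (liked_gifts_ids : List (List (String × Int))) (out : Bool) : Decidable (Spec_is_spammer liked_gifts_ids out) := by unfold Spec_is_spammer; infer_instance

-- ===== CLAIM (what is proved, stated in full; the proofs are below) =====
def Claim_equal_is_spammer : Prop := ∀ (liked_gifts_ids : List (List (String × Int))), Dom_is_spammer liked_gifts_ids → Pre_is_spammer liked_gifts_ids → Spec_is_spammer liked_gifts_ids (is_spammer liked_gifts_ids)

-- ===== LEMMAS AND PROOFS =====

-- the dislike-timestamp list of xs, in xs's order
def dts (xs : List (List (String × Int))) : List Int :=
  (xs.filter (fun o => (o.lookup "is_like").getD 0 == 0)).map (fun o => (o.lookup "timestamp").getD 0)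

theorem dts_cons_pos (o : List (String × Int)) (rest : List (List (String × Int)))
    (h : ((o.lookup "is_like").getD 0 == 0) = true) :
    dts (o :: rest) = (o.lookup "timestamp").getD 0 :: dts rest := by
  simp [dts, h]

theorem dts_cons_neg (o : List (String × Int)) (rest : List (List (String × Int)))
    (h : ((o.lookup "is_like").getD 0 == 0) = false) :
    dts (o :: rest) = dts rest := by
  simp [dts, h]

-- A-side: once the counter is ≥ 5 and, if exactly 5, the span already failed, A never returns True
theorem spamLoopA_dead (xs : List (List (String × Int))) :
    ∀ (found : Bool) (fts lts cnt : Int), 5 ≤ cnt → (cnt = 5 → ¬ fts - lts ≤ 5000) →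
    spamLoopA xs found fts lts cnt = false := by
  induction xs with
  | nil => intros; simp [spamLoopA]
  | cons o rest ih =>
    intro found fts lts cnt h5 hspan
    have hne : ((cnt + 1) == (5 : Int)) = false := by rw [beq_eq_false_iff_ne]; omega
    simp only [spamLoopA]
    by_cases h1 : (!found && ((o.lookup "is_like").getD 0 == 0)) = true
    · simp only [h1, if_true, hne, Bool.false_and]
      exact ih _ _ _ _ (by omega) (by omega)
    · simp only [h1]
      by_cases h2 : ((o.lookup "is_like").getD 0 == 0) = true
      · simp only [h2, if_true, hne, Bool.false_and]
        exact ih _ _ _ _ (by omega) (by omega)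
      · simp only [h2]
        by_cases h3 : cnt = 5
        · have : decide (fts - lts ≤ 5000) = false := by
            simp only [decide_eq_false_iff_not]; exact hspan h3
          simp only [this, Bool.and_false]
          exact ih _ _ _ _ h5 hspan
        · have : (cnt == (5 : Int)) = false := by rw [beq_eq_false_iff_ne]; exact h3
          simp only [this, Bool.false_and]
          exact ih _ _ _ _ h5 hspan

-- A-side: after the first dislike was seen (counter = 5-k, k more dislikes needed, 1 ≤ k ≤ 4),
-- A returns True iff xs still holds k dislikes and first_ts minus the k-th of them fits the window
theorem spamLoopA_live (xs : List (List (String × Int))) :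
    ∀ (k : Nat) (fts lts : Int), 1 ≤ k → k ≤ 4 →
    spamLoopA xs true fts lts (5 - (k : Int)) =
      decide (k ≤ (dts xs).length ∧ fts - (dts xs).getD (k - 1) 0 ≤ 5000) := by
  induction xs with
  | nil =>
    intro k fts lts hk1 hk4
    have : ¬ (k ≤ (dts []).length) := by simp [dts]; omega
    simp [spamLoopA, this]
  | cons o rest ih =>
    intro k fts lts hk1 hk4
    simp only [spamLoopA, Bool.not_true, Bool.false_and]
    by_cases hd : ((o.lookup "is_like").getD 0 == 0) = true
    · rw [dts_cons_pos o rest hd]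
      simp only [hd, if_true]
      by_cases hk : k = 1
      · subst hk
        simp only [Nat.cast_one]
        by_cases hs : fts - (o.lookup "timestamp").getD 0 ≤ 5000
        · simp [hs]
        · have hrec : spamLoopA rest true fts ((o.lookup "timestamp").getD 0) 5 = false :=
            spamLoopA_dead rest true fts _ 5 (by norm_num) (fun _ => hs)
          simp [hs, hrec]
      · have hk2 : 2 ≤ k := by omega
        have hne : ((5 : Int) - (k : Int) + 1 == 5) = false := by
          rw [beq_eq_false_iff_ne]; omega
        simp only [hne, Bool.false_and]
        have hcast : (5 : Int) - (k : Int) + 1 = 5 - ((k - 1 : Nat) : Int) := by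
          push_cast [Nat.cast_sub hk1]; ring
        rw [hcast, ih (k - 1) fts _ (by omega) (by omega)]
        simp only [Bool.false_eq_true, if_false]
        rw [decide_eq_decide]
        constructor
        · rintro ⟨hl, hs⟩
          refine ⟨by simp [List.length_cons]; omega, ?_⟩
          have hidx : k - 1 = (k - 2) + 1 := by omega
          rw [hidx, List.getD_cons_succ]
          have : k - 1 - 1 = k - 2 := by omega
          rwa [this] at hs
        · rintro ⟨hl, hs⟩
          refine ⟨by simp [List.length_cons] at hl; omega, ?_⟩
          have hidx : k - 1 = (k - 2) + 1 := by omega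
          rw [hidx, List.getD_cons_succ] at hs
          have : k - 1 - 1 = k - 2 := by omega
          rwa [this]
    · rw [dts_cons_neg o rest (by simpa using hd)]
      have hne : ((5 : Int) - (k : Int) == 5) = false := by rw [beq_eq_false_iff_ne]; omega
      simp only [hd, hne, Bool.false_and]
      exact ih k fts lts hk1 hk4

-- A-side: A's full loop computes the closed-form condition on the dislike-timestamp list
theorem spamLoopA_top (xs : List (List (String × Int))) :
    spamLoopA xs false 0 0 0 =
      decide (5 ≤ (dts xs).length ∧ (dts xs).getD 0 0 - (dts xs).getD 4 0 ≤ 5000) := by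
  induction xs with
  | nil =>
    have : ¬ (5 ≤ (dts []).length) := by simp [dts]
    simp [spamLoopA, this]
  | cons o rest ih =>
    simp only [spamLoopA, Bool.not_false, Bool.true_and]
    by_cases hd : ((o.lookup "is_like").getD 0 == 0) = true
    · rw [dts_cons_pos o rest hd]
      have h15 : ((0 : Int) + 1 == 5) = false := by decide
      simp only [hd, if_true, h15, Bool.false_and]
      have hcast : (0 : Int) + 1 = 5 - ((4 : Nat) : Int) := by norm_num
      rw [hcast, spamLoopA_live rest 4 _ 0 (by norm_num) (by norm_num)]
      simp only [Bool.false_eq_true, if_false]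
      rw [decide_eq_decide]
      constructor
      · rintro ⟨hl, hs⟩
        exact ⟨by simp [List.length_cons]; omega, by simpa using hs⟩
      · rintro ⟨hl, hs⟩
        exact ⟨by simp [List.length_cons] at hl; omega, by simpa using hs⟩
    · rw [dts_cons_neg o rest (by simpa using hd)]
      simp only [hd]
      have h05 : ((0 : Int) == 5) = false := by decide
      simp only [h05, Bool.false_and]
      exact ih

-- B-side: the sliding window is always the suffix of length ≤ 5 of (initial window ++ dislikes so far)
theorem spamLoopB_eq (xs : List (List (String × Int))) :
    ∀ (w : List Int), w.length ≤ 5 →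
    spamLoopB xs w = (w ++ dts xs).drop (w.length + (dts xs).length - 5) := by
  induction xs with
  | nil =>
    intro w hw
    have h0 : dts [] = [] := by simp [dts]
    have hz : w.length - 5 = 0 := by omega
    simp [spamLoopB, h0, hz]
  | cons o rest ih =>
    intro w hw
    simp only [spamLoopB]
    by_cases hd : ((o.lookup "is_like").getD 0 == 0) = true
    · rw [dts_cons_pos o rest hd]
      set t := (o.lookup "timestamp").getD 0 with ht
      simp only [hd, if_true]
      by_cases h5 : 5 < (w ++ [t]).length
      · have hw5 : w.length = 5 := by simp at h5; omega
        have hne : w ≠ [] := by intro h; subst h; simp at hw5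
        simp only [h5, if_true]
        rw [ih _ (by simp [List.length_tail]; omega)]
        have h1 : (w ++ [t]).tail = w.tail ++ [t] := by
          cases w with
          | nil => exact absurd rfl hne
          | cons a as => simp
        have h2 : ((w ++ [t]).tail).length = 5 := by simp [List.length_tail]; omega
        rw [h2, h1]
        have h3 : w.tail ++ [t] ++ dts rest = (w ++ t :: dts rest).drop 1 := by
          cases w with
          | nil => exact absurd rfl hne
          | cons a as => simp
        rw [h3, List.drop_drop]
        congr 1
        simp [hw5]
        omega
      · simp only [h5, if_false]
        rw [ih _ (by simp at h5 ⊢; omega)]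
        have : w ++ [t] ++ dts rest = w ++ t :: dts rest := by simp
        rw [this]
        congr 1
        simp
        omega
    · rw [dts_cons_neg o rest (by simpa using hd)]
      simp only [hd]
      exact ih w hw

-- indexing facts tying the window's ends to the reversed list's 1st and 5th entries
theorem getD_reverse_zero (L : List Int) (h : 5 ≤ L.length) :
    L.reverse.getD 0 0 = ((L.drop (L.length - 5)).getLast?).getD 0 := by
  have hne : L.drop (L.length - 5) ≠ [] := by
    intro hc; have := congrArg List.length hc; simp at this; omega
  have h2 : L.getLast? = (L.drop (L.length - 5)).getLast? := by
    conv_lhs => rw [← List.take_append_drop (L.length - 5) L]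
    rw [List.getLast?_append_of_ne_nil _ hne]
  rw [List.getD_eq_getElem?_getD, List.getElem?_reverse (by omega), Nat.sub_zero,
    ← List.getLast?_eq_getElem?, h2]

theorem getD_reverse_four (L : List Int) (h : 5 ≤ L.length) :
    L.reverse.getD 4 0 = ((L.drop (L.length - 5)).headD 0) := by
  rw [List.getD_eq_getElem?_getD, List.getElem?_reverse (by omega)]
  rw [List.headD_eq_head?_getD, List.head?_drop]
  have : L.length - 1 - 4 = L.length - 5 := by omega
  rw [this]

-- ===== VERDICT (by name: the statement is the Claim_ definition above) =====
theorem is_spammer_spec : Claim_equal_is_spammer := by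
  intro l _ _
  show is_spammer l = is_spammer_alt l
  rw [is_spammer, spamLoopA_top]
  have hrev : dts l.reverse = (dts l).reverse := by
    simp [dts, List.filter_reverse, List.map_reverse]
  rw [hrev]
  rw [show is_spammer_alt l = (((spamLoopB l []).length == 5) &&
        decide ((spamLoopB l []).getLast?.getD 0 - (spamLoopB l []).headD 0 ≤ 5000)) from rfl]
  rw [spamLoopB_eq l [] (by simp)]
  simp only [List.nil_append, List.length_nil, Nat.zero_add]
  set L := dts l with hL
  by_cases h : 5 ≤ L.length
  · have hlen : (L.drop (L.length - 5)).length = 5 := by simp; omega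
    rw [getD_reverse_zero L h, getD_reverse_four L h, hlen]
    simp [h]
  · have hlen : L.length - 5 = 0 := by omega
    rw [hlen, List.drop_zero]
    have : (L.length == 5) = false := by rw [beq_eq_false_iff_ne]; omega
    simp [h, this]
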